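-- pv_equiv track=rewrite | github.com/Arsen1302/Code-copy-detector | TestData/solutions/problem_787_5.py | solution_787_5
-- ===== SOURCE A (Python) =====
-- def solution_787_5(arr):
--     n = len(arr)
--
--     dp0, dp1, max_val = [0]*n, [0]*n, arr[0]
--
--     dp0[0] = arr[0]
--
--     for i in range(1,n):
--         dp0[i] = max(dp0[i-1] + arr[i],arr[i])
--         dp1[i] = max(dp1[i-1] + arr[i],arr[i],dp0[i-1])
--         max_val = max(max_val,dp0[i],dp1[i])
--
--     return max_val
-- ===== SOURCE B (Python) =====
-- def solution_787_5(arr):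
--     # Staged passes: a forward table of best sums ending at each index, a backward
--     # table of best (possibly empty) continuation gains, then combine per deletion point.
--     end = [arr[0]]
--     for x in arr[1:]:
--         end.append(max(end[-1] + x, x))
--     gain = [0]
--     for x in reversed(arr[2:]):
--         gain.append(max(0, x + gain[-1]))
--     gain.reverse()
--     return max(end + [e + g for e, g in zip(end, gain)])
-- ===== Notes on version B (the rewrite author's own statement) =====
-- stated objective: alternative
-- what changed: A runs one coupled two-state DP loop (dp0/dp1 updated together, running max inside the loop); B instead makes staged independent passes: a forward table of best sums ending at each index, a backward table of best optional continuation gains, then zips the two tables to score each possible deletion point and takes the max of all candidates.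
import Mathlib
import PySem

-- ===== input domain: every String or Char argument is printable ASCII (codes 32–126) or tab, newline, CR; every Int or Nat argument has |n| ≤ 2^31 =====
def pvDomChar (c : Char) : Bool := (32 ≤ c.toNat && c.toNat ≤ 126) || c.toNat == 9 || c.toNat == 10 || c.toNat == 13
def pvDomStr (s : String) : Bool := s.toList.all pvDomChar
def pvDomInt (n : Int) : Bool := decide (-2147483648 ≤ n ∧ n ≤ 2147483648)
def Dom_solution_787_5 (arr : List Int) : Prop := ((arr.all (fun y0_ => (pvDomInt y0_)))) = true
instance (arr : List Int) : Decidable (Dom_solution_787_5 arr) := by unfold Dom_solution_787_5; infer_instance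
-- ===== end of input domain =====

-- B replaces A's single coupled two-state DP loop with staged passes: a forward table of best
-- sums ending at each index, a backward gain table, and a zip combining them per deletion point
-- (objective: alternative; same asymptotic cost).

-- ===== PORT A =====
-- the body of A's `for i in range(1, n)` loop; state is (dp0, dp1, max_val).
-- indices i and i-1 are always in range under Pre_, so pyGetD's default 0 is never read.
def pvAStep (arr : List Int) (st : List Int × List Int × Int) (i : Int) : List Int × List Int × Int :=
  let dp0 := st.1
  let dp1 := st.2.1
  let max_val := st.2.2
  let d0 := max (PySem.List.pyGetD dp0 (i - 1) 0 + PySem.List.pyGetD arr i 0) (PySem.List.pyGetD arr i 0)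
  let dp0' := PySem.List.pySetD dp0 i d0
  let d1 := max (max (PySem.List.pyGetD dp1 (i - 1) 0 + PySem.List.pyGetD arr i 0) (PySem.List.pyGetD arr i 0)) (PySem.List.pyGetD dp0 (i - 1) 0)
  let dp1' := PySem.List.pySetD dp1 i d1
  (dp0', dp1', max (max max_val (PySem.List.pyGetD dp0' i 0)) (PySem.List.pyGetD dp1' i 0))

def solution_787_5 (arr : List Int) : Int :=
  let n : Int := arr.length
  -- the initial state of A's loop; reading the first element raises on the empty list (excluded by Pre_)
  let dp0 := PySem.List.pySetD (List.replicate arr.length (0 : Int)) (0 : Int) (PySem.List.pyGetD arr 0 0)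
  let dp1 := List.replicate arr.length (0 : Int)
  let st := (PySem.List.pyRange 1 n 1).foldl (pvAStep arr) (dp0, dp1, PySem.List.pyGetD arr 0 0)
  st.2.2

-- ===== PORT B =====
-- forward table `end`, backward table `gain` (built then reversed), zipped candidates;
-- the final max is over a nonempty list under Pre_
def solution_787_5_alt (arr : List Int) : Int :=
  let endl := (PySem.List.slice arr (some 1) none).foldl
      (fun e x => e ++ [max (PySem.List.pyGetD e (-1) 0 + x) x]) [PySem.List.pyGetD arr 0 0]
  let gain0 := ((PySem.List.slice arr (some 2) none).reverse).foldl
      (fun g x => g ++ [max 0 (x + PySem.List.pyGetD g (-1) 0)]) [(0 : Int)]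
  let gain := gain0.reverse
  let cands := endl ++ (endl.zip gain).map (fun p => p.1 + p.2)
  (PySem.List.max? cands (fun y => y)).getD 0

-- ===== PRECONDITION & SPEC =====
-- A reads the first element unconditionally: it raises IndexError on the empty list (and so does B).
def Pre_solution_787_5 (arr : List Int) : Prop := arr ≠ []
instance (arr : List Int) : Decidable (Pre_solution_787_5 arr) := by unfold Pre_solution_787_5; infer_instance
def pvWitness_solution_787_5 : List Int := [1, -2, 3]

def Spec_solution_787_5 (arr : List Int) (out : Int) : Prop := out = solution_787_5_alt arr
instance (arr : List Int) (out : Int) : Decidable (Spec_solution_787_5 arr out) := by unfold Spec_solution_787_5; infer_instance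

-- ===== CLAIM (what is proved, stated in full; the proofs are below) =====
def Claim_equal_solution_787_5 : Prop := ∀ (arr : List Int), Dom_solution_787_5 arr → Pre_solution_787_5 arr → Spec_solution_787_5 arr (solution_787_5 arr)

-- ===== LEMMAS AND PROOFS =====

-- the scalar recurrence A's loop maintains (proof-side reference; used by BOTH directions)
def pvBStep (st : Int × Int × Int) (x : Int) : Int × Int × Int :=
  let b0 := max (st.1 + x) x
  let b1 := max (max (st.2.1 + x) x) st.1
  (b0, b1, max (max st.2.2 b0) b1)

def pvRun (a : Int) (q : List Int) : Int × Int × Int := q.foldl pvBStep (a, 0, a)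

-- candidate sets: sums of contiguous windows, possibly with one element deleted
/-- sums of nonempty suffixes of `p` -/
def EndC (p : List Int) (c : Int) : Prop := ∃ u t, p = u ++ t ∧ t ≠ [] ∧ c = t.sum
/-- sums of nonempty proper suffixes of `p` -/
def EndC' (p : List Int) (c : Int) : Prop := ∃ u t, p = u ++ t ∧ u ≠ [] ∧ t ≠ [] ∧ c = t.sum
/-- sums of windows of length ≥ 2 ending at the end of `p`, with one element deleted -/
def DelC (p : List Int) (c : Int) : Prop := ∃ u t y s, p = u ++ t ++ y :: s ∧ t ++ s ≠ [] ∧ c = t.sum + s.sum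
/-- all window candidates anywhere in `p` -/
def AllC (p : List Int) (c : Int) : Prop :=
  (∃ u t v, p = u ++ t ++ v ∧ t ≠ [] ∧ c = t.sum) ∨
  (∃ u t y s v, p = u ++ (t ++ y :: s) ++ v ∧ t ++ s ≠ [] ∧ c = t.sum + s.sum)

/-- loop invariant: the three scalars are the maxima of their candidate sets -/
def pvInv (p : List Int) (st : Int × Int × Int) : Prop :=
  (EndC p st.1 ∧ ∀ c, EndC p c → c ≤ st.1) ∧
  ((∀ c, EndC' p c ∨ DelC p c → c ≤ st.2.1) ∧
    ((EndC' p st.2.1 ∨ DelC p st.2.1) ∨ (st.2.1 = 0 ∧ p.length = 1))) ∧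
  (AllC p st.2.2 ∧ ∀ c, AllC p c → c ≤ st.2.2)

lemma endC_append_iff (p : List Int) (x c : Int) :
    EndC (p ++ [x]) c ↔ c = x ∨ ∃ d, EndC p d ∧ c = d + x := by
  constructor
  · rintro ⟨u, t, heq, ht, rfl⟩
    rcases List.eq_nil_or_concat' t with rfl | ⟨t', z, rfl⟩
    · exact absurd rfl ht
    · have h2 : u ++ t' ++ [z] = p ++ [x] := by simpa [List.append_assoc] using heq.symm
      obtain ⟨h1, rfl⟩ := List.append_singleton_inj.mp h2
      rcases eq_or_ne t' [] with rfl | ht'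
      · left; simp
      · right; exact ⟨t'.sum, ⟨u, t', h1.symm, ht', rfl⟩, by simp⟩
  · rintro (hc | ⟨d, ⟨u, t, rfl, ht, rfl⟩, rfl⟩)
    · exact ⟨p, [x], by simp, by simp, by simp [hc]⟩
    · exact ⟨u, t ++ [x], by simp, by simp, by simp⟩

lemma endC'_append_iff (p : List Int) (x c : Int) :
    EndC' (p ++ [x]) c ↔ (c = x ∧ p ≠ []) ∨ ∃ d, EndC' p d ∧ c = d + x := by
  constructor
  · rintro ⟨u, t, heq, hu, ht, rfl⟩
    rcases List.eq_nil_or_concat' t with rfl | ⟨t', z, rfl⟩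
    · exact absurd rfl ht
    · have h2 : u ++ t' ++ [z] = p ++ [x] := by simpa [List.append_assoc] using heq.symm
      obtain ⟨h1, rfl⟩ := List.append_singleton_inj.mp h2
      rcases eq_or_ne t' [] with rfl | ht'
      · left; constructor
        · simp
        · rw [← h1]; simpa using hu
      · right; exact ⟨t'.sum, ⟨u, t', h1.symm, hu, ht', rfl⟩, by simp⟩
  · rintro (⟨hc, hp⟩ | ⟨d, ⟨u, t, rfl, hu, ht, rfl⟩, rfl⟩)
    · exact ⟨p, [x], by simp, hp, by simp, by simp [hc]⟩
    · exact ⟨u, t ++ [x], by simp, hu, by simp, by simp⟩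

lemma delC_append_iff (p : List Int) (x c : Int) :
    DelC (p ++ [x]) c ↔ EndC p c ∨ (∃ d, DelC p d ∧ c = d + x) ∨ (c = x ∧ p ≠ []) := by
  constructor
  · rintro ⟨u, t, y, s, heq, hts, rfl⟩
    rcases List.eq_nil_or_concat' s with rfl | ⟨s', z, rfl⟩
    · -- y is the last element: y = x, p = u ++ t
      have h2 : (u ++ t) ++ [y] = p ++ [x] := by simpa [List.append_assoc] using heq.symm
      obtain ⟨h1, rfl⟩ := List.append_singleton_inj.mp h2
      left; exact ⟨u, t, h1.symm, by simpa using hts, by simp⟩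
    · have h2 : (u ++ t ++ y :: s') ++ [z] = p ++ [x] := by
        simpa [List.append_assoc] using heq.symm
      obtain ⟨h1, rfl⟩ := List.append_singleton_inj.mp h2
      rcases eq_or_ne (t ++ s') ([] : List Int) with hns | hns
      · right; right
        rw [List.append_eq_nil_iff] at hns
        obtain ⟨rfl, rfl⟩ := hns
        constructor
        · simp
        · rw [← h1]; simp
      · right; left
        exact ⟨t.sum + s'.sum, ⟨u, t, y, s', h1.symm, hns, rfl⟩, by simp; ring⟩
  · rintro (⟨u, t, rfl, ht, rfl⟩ | ⟨d, ⟨u, t, y, s, rfl, hts, rfl⟩, rfl⟩ | ⟨hc, hp⟩)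
    · exact ⟨u, t, x, [], by simp, by simpa using ht, by simp⟩
    · exact ⟨u, t, y, s ++ [x], by simp, by simp, by simp; ring⟩
    · rcases List.eq_nil_or_concat' p with rfl | ⟨p', z, rfl⟩
      · exact absurd rfl hp
      · exact ⟨p', [], z, [x], by simp, by simp, by simp [hc]⟩

lemma allC_append_iff (p : List Int) (x c : Int) :
    AllC (p ++ [x]) c ↔ AllC p c ∨ EndC (p ++ [x]) c ∨ DelC (p ++ [x]) c := by
  constructor
  · rintro (⟨u, t, v, heq, ht, rfl⟩ | ⟨u, t, y, s, v, heq, hts, rfl⟩)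
    · rcases List.eq_nil_or_concat' v with rfl | ⟨v', z, rfl⟩
      · right; left; exact ⟨u, t, by simpa using heq, ht, rfl⟩
      · have h2 : (u ++ t ++ v') ++ [z] = p ++ [x] := by simpa [List.append_assoc] using heq.symm
        obtain ⟨h1, rfl⟩ := List.append_singleton_inj.mp h2
        left; left; exact ⟨u, t, v', by simpa [List.append_assoc] using h1.symm, ht, rfl⟩
    · rcases List.eq_nil_or_concat' v with rfl | ⟨v', z, rfl⟩
      · right; right
        exact ⟨u, t, y, s, by simpa [List.append_assoc] using heq, hts, rfl⟩
      · have h2 : (u ++ (t ++ y :: s) ++ v') ++ [z] = p ++ [x] := by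
          simpa [List.append_assoc] using heq.symm
        obtain ⟨h1, rfl⟩ := List.append_singleton_inj.mp h2
        left; right; exact ⟨u, t, y, s, v', by simpa [List.append_assoc] using h1.symm, hts, rfl⟩
  · rintro ((⟨u, t, v, rfl, ht, rfl⟩ | ⟨u, t, y, s, v, rfl, hts, rfl⟩) | ⟨u, t, heq, ht, rfl⟩ | ⟨u, t, y, s, heq, hts, rfl⟩)
    · exact Or.inl ⟨u, t, v ++ [x], by simp, ht, rfl⟩
    · exact Or.inr ⟨u, t, y, s, v ++ [x], by simp, hts, rfl⟩
    · exact Or.inl ⟨u, t, [], by simpa using heq, ht, rfl⟩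
    · exact Or.inr ⟨u, t, y, s, [], by simpa [List.append_assoc] using heq, hts, rfl⟩

lemma endC_of_endC' (p : List Int) (c : Int) (h : EndC' p c) : EndC p c := by
  obtain ⟨u, t, heq, _, ht, hc⟩ := h
  exact ⟨u, t, heq, ht, hc⟩

lemma endC_singleton (a c : Int) : EndC [a] c ↔ c = a := by
  constructor
  · rintro ⟨u, t, heq, ht, rfl⟩
    have hl := congrArg List.length heq
    simp [List.length_append] at hl
    have hu : u = [] := List.eq_nil_of_length_eq_zero (by
      have := List.length_pos_of_ne_nil ht; omega)
    subst hu
    obtain rfl : t = [a] := by simpa using heq.symm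
    simp
  · exact fun hc => ⟨[], [a], by simp, by simp, by simp [hc]⟩

lemma endC'_singleton (a c : Int) : ¬ EndC' [a] c := by
  rintro ⟨u, t, heq, hu, ht, rfl⟩
  have := congrArg List.length heq
  simp [List.length_append] at this
  rcases u with _ | _ <;> rcases t with _ | _ <;> simp_all

lemma delC_singleton (a c : Int) : ¬ DelC [a] c := by
  rintro ⟨u, t, y, s, heq, hts, rfl⟩
  have := congrArg List.length heq
  simp [List.length_append] at this
  have h1 : t = [] := List.eq_nil_of_length_eq_zero (by omega)
  have h2 : s = [] := List.eq_nil_of_length_eq_zero (by omega)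
  exact hts (by rw [h1, h2]; simp)

lemma allC_singleton (a c : Int) : AllC [a] c ↔ c = a := by
  constructor
  · rintro (⟨u, t, v, heq, ht, rfl⟩ | ⟨u, t, y, s, v, heq, hts, rfl⟩)
    · have hl := congrArg List.length heq
      simp [List.length_append] at hl
      have hu : u = [] := List.eq_nil_of_length_eq_zero (by
        have := List.length_pos_of_ne_nil ht; omega)
      have hv : v = [] := List.eq_nil_of_length_eq_zero (by
        have := List.length_pos_of_ne_nil ht; omega)
      subst hu hv
      obtain rfl : t = [a] := by simpa using heq.symm
      simp
    · have hl := congrArg List.length heq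
      simp [List.length_append] at hl
      have h1 : t = [] := List.eq_nil_of_length_eq_zero (by omega)
      have h2 : s = [] := List.eq_nil_of_length_eq_zero (by omega)
      exact absurd (by rw [h1, h2]; simp) hts
  · exact fun hc => Or.inl ⟨[], [a], [], by simp, by simp, by simp [hc]⟩

lemma inv_base (a : Int) : pvInv [a] (a, 0, a) := by
  refine ⟨⟨(endC_singleton a a).mpr rfl, ?_⟩, ⟨?_, Or.inr ⟨rfl, rfl⟩⟩,
    (allC_singleton a a).mpr rfl, ?_⟩
  · intro c hc; rw [endC_singleton] at hc; simp [hc]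
  · rintro c (hc | hc)
    · exact absurd hc (endC'_singleton a c)
    · exact absurd hc (delC_singleton a c)
  · intro c hc; rw [allC_singleton] at hc; simp [hc]

lemma inv_step (p : List Int) (st : Int × Int × Int) (x : Int) (hp : p ≠ [])
    (h : pvInv p st) : pvInv (p ++ [x]) (pvBStep st x) := by
  obtain ⟨d0, d1, m⟩ := st
  obtain ⟨⟨h0a, h0u⟩, ⟨h1u, h1a⟩, h2a, h2u⟩ := h
  simp only at h0a h0u h1u h1a h2a h2u
  have hb0u : ∀ c, EndC (p ++ [x]) c → c ≤ max (d0 + x) x := by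
    intro c hc
    rcases (endC_append_iff p x c).mp hc with rfl | ⟨d, hd, rfl⟩
    · exact le_max_right _ _
    · exact le_trans (by have := h0u d hd; omega) (le_max_left _ _)
  have hb0a : EndC (p ++ [x]) (max (d0 + x) x) := by
    rcases max_choice (d0 + x) x with hm | hm <;> rw [hm]
    · exact (endC_append_iff p x _).mpr (Or.inr ⟨d0, h0a, rfl⟩)
    · exact (endC_append_iff p x _).mpr (Or.inl rfl)
  have hb1u : ∀ c, EndC' (p ++ [x]) c ∨ DelC (p ++ [x]) c → c ≤ max (max (d1 + x) x) d0 := by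
    rintro c (hc | hc)
    · rcases (endC'_append_iff p x c).mp hc with ⟨rfl, -⟩ | ⟨d, hd, rfl⟩
      · exact le_trans (le_max_right _ _) (le_max_left _ _)
      · have := h1u d (Or.inl hd)
        exact le_trans (by omega) (le_trans (le_max_left _ _) (le_max_left _ _))
    · rcases (delC_append_iff p x c).mp hc with hc | ⟨d, hd, rfl⟩ | ⟨rfl, -⟩
      · exact le_trans (h0u c hc) (le_max_right _ _)
      · have := h1u d (Or.inr hd)
        exact le_trans (by omega) (le_trans (le_max_left _ _) (le_max_left _ _))
      · exact le_trans (le_max_right _ _) (le_max_left _ _)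
  have hb1a : EndC' (p ++ [x]) (max (max (d1 + x) x) d0) ∨ DelC (p ++ [x]) (max (max (d1 + x) x) d0) := by
    rcases max_choice (max (d1 + x) x) d0 with hm | hm <;> rw [hm]
    · rcases max_choice (d1 + x) x with hm2 | hm2 <;> rw [hm2]
      · rcases h1a with (h1 | h1) | ⟨rfl, -⟩
        · exact Or.inl ((endC'_append_iff p x _).mpr (Or.inr ⟨d1, h1, rfl⟩))
        · exact Or.inr ((delC_append_iff p x _).mpr (Or.inr (Or.inl ⟨d1, h1, rfl⟩)))
        · rw [zero_add]
          exact Or.inl ((endC'_append_iff p x _).mpr (Or.inl ⟨rfl, hp⟩))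
      · exact Or.inl ((endC'_append_iff p x _).mpr (Or.inl ⟨rfl, hp⟩))
    · exact Or.inr ((delC_append_iff p x _).mpr (Or.inl h0a))
  refine ⟨⟨hb0a, hb0u⟩, ⟨hb1u, Or.inl hb1a⟩, ?_, ?_⟩
  · simp only [pvBStep]
    rcases max_choice (max m (max (d0 + x) x)) (max (max (d1 + x) x) d0) with hm | hm <;> rw [hm]
    · rcases max_choice m (max (d0 + x) x) with hm2 | hm2 <;> rw [hm2]
      · exact (allC_append_iff p x m).mpr (Or.inl h2a)
      · exact (allC_append_iff p x _).mpr (Or.inr (Or.inl hb0a))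
    · rcases hb1a with h1 | h1
      · exact (allC_append_iff p x _).mpr (Or.inr (Or.inl (endC_of_endC' _ _ h1)))
      · exact (allC_append_iff p x _).mpr (Or.inr (Or.inr h1))
  · intro c hc
    simp only [pvBStep]
    rcases (allC_append_iff p x c).mp hc with hc | hc | hc
    · exact le_trans (h2u c hc) (le_trans (le_max_left _ _) (le_max_left _ _))
    · exact le_trans (hb0u c hc) (le_trans (le_max_right _ _) (le_max_left _ _))
    · exact le_trans (hb1u c (Or.inr hc)) (le_max_right _ _)

lemma run_inv (a : Int) (q : List Int) : pvInv (a :: q) (pvRun a q) := by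
  induction q using List.reverseRecOn with
  | nil => exact inv_base a
  | append_singleton q x ih =>
      have hr : pvRun a (q ++ [x]) = pvBStep (pvRun a q) x := by
        simp [pvRun, List.foldl_append]
      rw [hr, show a :: (q ++ [x]) = (a :: q) ++ [x] by simp]
      exact inv_step (a :: q) (pvRun a q) x (by simp) ih

-- ===== A's loop reduces to pvRun =====

def pvAState (a : Int) (q : List Int) (k : Nat) : List Int × List Int × Int :=
  (PySem.List.pyRange 1 (1 + (k : Int)) 1).foldl (pvAStep (a :: q))
    ((List.replicate (q.length + 1) (0 : Int)).set 0 a, List.replicate (q.length + 1) (0 : Int), a)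

lemma a_loop (a : Int) (q : List Int) (k : Nat) (hk : k ≤ q.length) :
    (pvAState a q k).1.length = q.length + 1 ∧ (pvAState a q k).2.1.length = q.length + 1 ∧
    (pvAState a q k).1.getD k 0 = (pvRun a (q.take k)).1 ∧
    (pvAState a q k).2.1.getD k 0 = (pvRun a (q.take k)).2.1 ∧
    (pvAState a q k).2.2 = (pvRun a (q.take k)).2.2 := by
  induction k with
  | zero =>
      have h0 : PySem.List.pyRange 1 (1 + (0 : Int)) 1 = [] :=
        PySem.List.pyRange_one_eq_nil (by omega)
      simp [pvAState, pvRun, List.getD]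
  | succ k ih =>
      have hk' : k ≤ q.length := by omega
      obtain ⟨hl0, hl1, hd0, hd1, hm⟩ := ih hk'
      have hrng : PySem.List.pyRange 1 (1 + ((k + 1 : Nat) : Int)) 1 =
          PySem.List.pyRange 1 (1 + (k : Int)) 1 ++ [1 + (k : Int)] := by
        have := PySem.List.pyRange_one_succ_right (a := 1) (b := 1 + (k : Int)) (by omega)
        rw [show (1 + ((k + 1 : Nat) : Int)) = 1 + (k : Int) + 1 by push_cast; ring, this]
      have hst : pvAState a q (k + 1) = pvAStep (a :: q) (pvAState a q k) (1 + (k : Int)) := by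
        rw [pvAState, hrng, List.foldl_append]
        rfl
      have hkq : k < q.length := by omega
      -- the element read this iteration
      have harr : PySem.List.pyGetD (a :: q) (1 + (k : Int)) 0 = q[k] := by
        rw [show (1 + (k : Int)) = ((k + 1 : Nat) : Int) by push_cast; ring]
        rw [PySem.List.pyGetD_natCast]
        simp [List.getD_eq_getElem?_getD, List.getElem?_eq_getElem hkq]
      have hidx : (1 + (k : Int)) - 1 = ((k : Nat) : Int) := by ring
      have htake : q.take (k + 1) = q.take k ++ [q[k]] := by
        rw [List.take_add_one, List.getElem?_eq_getElem hkq]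
        rfl
      have hruns : pvRun a (q.take (k + 1)) = pvBStep (pvRun a (q.take k)) q[k] := by
        rw [htake, pvRun, List.foldl_append]
        rfl
      have hlen0 : k + 1 < (pvAState a q k).1.length := by omega
      have hlen1 : k + 1 < (pvAState a q k).2.1.length := by omega
      have hcast : (1 + (k : Int)) = ((k + 1 : Nat) : Int) := by push_cast; ring
      have hget0 : PySem.List.pyGetD (pvAState a q k).1 ((1 + (k : Int)) - 1) 0 = (pvRun a (q.take k)).1 := by
        rw [hidx, PySem.List.pyGetD_natCast, hd0]
      have hget1 : PySem.List.pyGetD (pvAState a q k).2.1 ((1 + (k : Int)) - 1) 0 = (pvRun a (q.take k)).2.1 := by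
        rw [hidx, PySem.List.pyGetD_natCast, hd1]
      have hset0 : ∀ v : Int, PySem.List.pySetD (pvAState a q k).1 (1 + (k : Int)) v = (pvAState a q k).1.set (k+1) v := by
        intro v; rw [hcast, PySem.List.pySetD_natCast]
      have hset1 : ∀ v : Int, PySem.List.pySetD (pvAState a q k).2.1 (1 + (k : Int)) v = (pvAState a q k).2.1.set (k+1) v := by
        intro v; rw [hcast, PySem.List.pySetD_natCast]
      have hgs : ∀ (l : List Int) (v : Int), k + 1 < l.length →
          PySem.List.pyGetD (l.set (k+1) v) (1 + (k : Int)) 0 = v := by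
        intro l v hv
        rw [hcast, PySem.List.pyGetD_natCast]
        simp [List.getD_eq_getElem?_getD, hv]
      rw [hst]
      simp only [pvAStep, hget0, hget1, harr, hset0, hset1]
      rw [hgs _ _ hlen0, hgs _ _ hlen1]
      refine ⟨by simp [hl0], by simp [hl1], ?_, ?_, ?_⟩
      · simp [List.getD_eq_getElem?_getD, hlen0, hruns, pvBStep]
      · simp [List.getD_eq_getElem?_getD, hlen1, hruns, pvBStep]
      · rw [hruns, hm]; rfl

lemma a_eq_run (a : Int) (q : List Int) : solution_787_5 (a :: q) = (pvRun a q).2.2 := by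
  have h := (a_loop a q q.length le_rfl).2.2.2.2
  rw [List.take_length] at h
  rw [← h]
  unfold solution_787_5 pvAState
  simp only [List.length_cons, PySem.List.pyGetD_zero_cons]
  have h1 : (((q.length + 1 : Nat)) : Int) = 1 + (q.length : Int) := by push_cast; ring
  have h2 : PySem.List.pySetD (List.replicate (q.length + 1) (0 : Int)) (0 : Int) a =
      (List.replicate (q.length + 1) (0 : Int)).set 0 a := by
    rw [show (0 : Int) = ((0 : Nat) : Int) from rfl, PySem.List.pySetD_natCast]
  rw [h1, h2]

-- ===== B's tables in closed form =====

/-- the forward `end` table as a structural recursion -/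
def pvEndL (a : Int) : List Int → List Int
  | [] => [a]
  | x :: xs => a :: pvEndL (max (a + x) x) xs

/-- the backward `gain` table (before the final reverse) as a structural recursion -/
def pvGL (z : Int) : List Int → List Int
  | [] => [z]
  | y :: ys => z :: pvGL (max 0 (y + z)) ys

/-- best (possibly empty) prefix sum of a list -/
def pvGain : List Int → Int
  | [] => 0
  | x :: s => max 0 (x + pvGain s)

lemma foldE_eq (xs : List Int) : ∀ (e : List Int) (a : Int),
    xs.foldl (fun e x => e ++ [max (PySem.List.pyGetD e (-1) 0 + x) x]) (e ++ [a]) =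
      e ++ pvEndL a xs := by
  induction xs with
  | nil => intro e a; simp [pvEndL]
  | cons x xs ih =>
      intro e a
      simp only [List.foldl_cons, PySem.List.pyGetD_neg_one_append_singleton]
      rw [show (e ++ [a]) ++ [max (a + x) x] = (e ++ [a]) ++ [max (a + x) x] from rfl,
        ih (e ++ [a]) (max (a + x) x)]
      simp [pvEndL]

lemma foldG_eq (xs : List Int) : ∀ (g : List Int) (z : Int),
    xs.foldl (fun g x => g ++ [max 0 (x + PySem.List.pyGetD g (-1) 0)]) (g ++ [z]) =
      g ++ pvGL z xs := by
  induction xs with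
  | nil => intro g z; simp [pvGL]
  | cons x xs ih =>
      intro g z
      simp only [List.foldl_cons, PySem.List.pyGetD_neg_one_append_singleton]
      rw [ih (g ++ [z]) (max 0 (x + z))]
      simp [pvGL]

lemma fst_foldl (p : List Int) : ∀ (s t : Int × Int × Int), s.1 = t.1 →
    (p.foldl pvBStep s).1 = (p.foldl pvBStep t).1 := by
  induction p with
  | nil => intro s t h; simpa using h
  | cons x p ih =>
      intro s t h
      simp only [List.foldl_cons]
      exact ih _ _ (by simp [pvBStep, h])

lemma endL_eq_map (q : List Int) : ∀ a : Int,
    pvEndL a q = (List.range (q.length + 1)).map (fun k => (pvRun a (q.take k)).1) := by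
  induction q with
  | nil => intro a; simp [pvEndL, pvRun]
  | cons x q ih =>
      intro a
      have h1 : List.range (q.length + 1 + 1) = 0 :: (List.range (q.length + 1)).map Nat.succ :=
        List.range_succ_eq_map
      simp only [pvEndL, List.length_cons]
      rw [h1, List.map_cons, List.map_map, ih (max (a + x) x)]
      refine congrArg₂ List.cons rfl ?_
      apply List.map_congr_left
      intro k hk
      simp only [Function.comp_apply, List.take_succ_cons, pvRun, List.foldl_cons]
      exact fst_foldl _ _ _ (by simp [pvBStep])

lemma gain_nonneg (s : List Int) : 0 ≤ pvGain s := by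
  cases s <;> simp [pvGain]

lemma gain_ge_prefix (s : List Int) : ∀ v : List Int, s.sum ≤ pvGain (s ++ v) := by
  induction s with
  | nil => intro v; simpa using gain_nonneg v
  | cons x s ih =>
      intro v
      simp only [List.cons_append, pvGain, List.sum_cons]
      have := ih v
      omega

lemma gain_cases (s : List Int) :
    pvGain s = 0 ∨ ∃ t v, s = t ++ v ∧ t ≠ [] ∧ pvGain s = t.sum := by
  induction s with
  | nil => exact Or.inl rfl
  | cons x s ih =>
      rcases max_choice 0 (x + pvGain s) with hm | hm
      · exact Or.inl (by simp [pvGain, hm])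
      · rcases ih with h0 | ⟨t, v, rfl, ht, hs⟩
        · exact Or.inr ⟨[x], s, rfl, by simp,
            by rw [show pvGain (x :: s) = max 0 (x + pvGain s) from rfl, hm, h0]; simp⟩
        · exact Or.inr ⟨x :: t, v, rfl, by simp,
            by rw [show pvGain (x :: (t ++ v)) = max 0 (x + pvGain (t ++ v)) from rfl, hm, hs]; simp⟩

lemma gL_rev (l₁ : List Int) : ∀ l₂ : List Int,
    pvGL (pvGain l₂) l₁.reverse =
      (((List.range (l₁.length + 1)).map (fun k => pvGain (l₁.drop k ++ l₂)))).reverse := by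
  induction l₁ using List.reverseRecOn with
  | nil => intro l₂; simp [pvGL]
  | append_singleton l' x ih =>
      intro l₂
      have hrev : (l' ++ [x]).reverse = x :: l'.reverse := by simp
      have hgx : max 0 (x + pvGain l₂) = pvGain (x :: l₂) := rfl
      have hrange : List.range (l'.length + 1 + 1) = List.range (l'.length + 1) ++ [l'.length + 1] :=
        List.range_succ
      rw [hrev]
      simp only [pvGL, hgx]
      rw [ih (x :: l₂)]
      simp only [List.length_append, List.length_singleton, hrange, List.map_append,
        List.map_cons, List.map_nil, List.reverse_append, List.reverse_cons, List.reverse_nil]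
      have hlast : (l' ++ [x]).drop (l'.length + 1) = [] := by
        simp [List.drop_append]
      rw [hlast]
      simp only [List.nil_append, List.cons_append]
      congr 1
      apply congrArg
      apply List.map_congr_left
      intro k hk
      have hk' : k ≤ l'.length := by
        have := List.mem_range.mp hk; omega
      rw [List.drop_append_of_le_length hk']
      simp

-- zip of two maps over ranges (shorter second list)
lemma zip_map_range (f g : Nat → Int) (n m : Nat) (h : m ≤ n) :
    List.zip ((List.range n).map f) ((List.range m).map g) =
      (List.range m).map (fun k => (f k, g k)) := by
  apply List.ext_getElem
  · simp; omega
  · intro i h1 h2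
    simp

-- evaluation of B's port on a nonempty list
lemma b_eval (a : Int) (q : List Int) :
    solution_787_5_alt (a :: q) =
      (PySem.List.max?
        ((List.range (q.length + 1)).map (fun k => (pvRun a (q.take k)).1) ++
          (List.range ((q.drop 1).length + 1)).map
            (fun k => (pvRun a (q.take k)).1 + pvGain (q.drop (k + 1))))
        (fun y => y)).getD 0 := by
  have hs1 : PySem.List.slice (a :: q) (some 1) none = q := by
    rw [PySem.List.slice_from_one]; rfl
  have hs2 : PySem.List.slice (a :: q) (some 2) none = q.drop 1 := by
    rw [show (2 : Int) = ((2 : Nat) : Int) from rfl, PySem.List.slice_from_natCast]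
    rfl
  have he : q.foldl (fun e x => e ++ [max (PySem.List.pyGetD e (-1) 0 + x) x]) [a] =
      pvEndL a q := by
    have := foldE_eq q [] a
    simpa using this
  have hg : (q.drop 1).reverse.foldl
      (fun g x => g ++ [max 0 (x + PySem.List.pyGetD g (-1) 0)]) [(0 : Int)] =
      pvGL (pvGain []) (q.drop 1).reverse := by
    have := foldG_eq (q.drop 1).reverse [] (0 : Int)
    simpa [pvGain] using this
  simp only [solution_787_5_alt, hs1, hs2, PySem.List.pyGetD_zero_cons]
  rw [he, hg, gL_rev (q.drop 1) [], List.reverse_reverse, endL_eq_map]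
  have hzip : List.zip ((List.range (q.length + 1)).map (fun k => (pvRun a (q.take k)).1))
      ((List.range ((q.drop 1).length + 1)).map (fun k => pvGain ((q.drop 1).drop k ++ []))) =
      (List.range ((q.drop 1).length + 1)).map
        (fun k => ((pvRun a (q.take k)).1, pvGain ((q.drop 1).drop k ++ []))) := by
    apply zip_map_range
    simp
  rw [hzip, List.map_map]
  have hmap : (List.range ((q.drop 1).length + 1)).map
      ((fun p : Int × Int => p.1 + p.2) ∘ fun k => ((pvRun a (q.take k)).1, pvGain ((q.drop 1).drop k ++ []))) =
      (List.range ((q.drop 1).length + 1)).map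
        (fun k => (pvRun a (q.take k)).1 + pvGain (q.drop (k + 1))) := by
    apply List.map_congr_left
    intro k hk
    simp
  rw [hmap]

-- prefix EndC candidates are AllC candidates of the whole list
lemma endC_take_allC (a : Int) (q : List Int) (k : Nat) (c : Int)
    (h : EndC (a :: q.take k) c) : AllC (a :: q) c := by
  obtain ⟨u, t, heq, ht, rfl⟩ := h
  refine Or.inl ⟨u, t, q.drop k, ?_, ht, rfl⟩
  have : a :: q = (a :: q.take k) ++ q.drop k := by simp
  rw [this, heq, List.append_assoc]

lemma take_prefix_eq (a : Int) (q u t : List Int) (rest : List Int)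
    (heq : a :: q = (u ++ t) ++ rest) (ht : t ≠ []) :
    a :: q.take (u.length + t.length - 1) = u ++ t := by
  have hlt : 1 ≤ t.length := List.length_pos_of_ne_nil ht
  have hk : u.length + t.length - 1 + 1 = (u ++ t).length := by
    simp [List.length_append]; omega
  have h1 : (a :: q).take (u.length + t.length - 1 + 1) = a :: q.take (u.length + t.length - 1) := by
    simp [List.take_succ_cons]
  rw [← h1, hk, heq, List.take_left]

-- every candidate in B's list is an AllC value
lemma cand_le_M (a : Int) (q : List Int) (c : Int)
    (hc : c ∈ (List.range (q.length + 1)).map (fun k => (pvRun a (q.take k)).1) ++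
      (List.range ((q.drop 1).length + 1)).map
        (fun k => (pvRun a (q.take k)).1 + pvGain (q.drop (k + 1)))) :
    c ≤ (pvRun a q).2.2 := by
  obtain ⟨-, -, -, hMu⟩ := run_inv a q
  rcases List.mem_append.mp hc with h | h
  · obtain ⟨k, -, rfl⟩ := List.mem_map.mp h
    obtain ⟨⟨hka, -⟩, -, -, -⟩ := run_inv a (q.take k)
    exact hMu _ (endC_take_allC a q k _ hka)
  · obtain ⟨k, -, rfl⟩ := List.mem_map.mp h
    obtain ⟨⟨hka, -⟩, -, -, -⟩ := run_inv a (q.take k)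
    rcases gain_cases (q.drop (k + 1)) with h0 | ⟨t, v, hdrop, ht, hgs⟩
    · rw [h0, add_zero]
      exact hMu _ (endC_take_allC a q k _ hka)
    · have hkq : k < q.length := by
        by_contra hge
        have : q.drop (k + 1) = [] := List.drop_eq_nil_of_le (by omega)
        rw [this] at hdrop
        exact ht (List.append_eq_nil_iff.mp hdrop.symm).1
      obtain ⟨u, w, heq, hw, hsum⟩ := hka
      have hdk : q.drop k = q[k] :: q.drop (k + 1) := List.drop_eq_getElem_cons hkq
      have hfull : a :: q = u ++ (w ++ q[k] :: t) ++ v := by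
        have h1 : a :: q = (a :: q.take k) ++ q.drop k := by simp
        rw [h1, heq, hdk, hdrop]
        simp [List.append_assoc]
      rw [hgs, hsum]
      exact hMu _ (Or.inr ⟨u, w, q[k], t, v, hfull, by simp [hw], rfl⟩)

-- every plain window sum is below some first-part candidate
lemma plain_le_cand (a : Int) (q u t v : List Int)
    (heq : a :: q = u ++ t ++ v) (ht : t ≠ []) :
    ∃ c ∈ (List.range (q.length + 1)).map (fun k => (pvRun a (q.take k)).1), t.sum ≤ c := by
  have hlt : 1 ≤ t.length := List.length_pos_of_ne_nil ht
  have hlen := congrArg List.length heq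
  simp [List.length_append] at hlen
  set k := u.length + t.length - 1 with hkdef
  have hk : k < q.length + 1 := by omega
  have hpre : a :: q.take k = u ++ t :=
    take_prefix_eq a q u t v (by rw [heq, List.append_assoc]) ht
  obtain ⟨⟨-, hbound⟩, -, -, -⟩ := run_inv a (q.take k)
  refine ⟨(pvRun a (q.take k)).1, List.mem_map.mpr ⟨k, List.mem_range.mpr hk, rfl⟩, ?_⟩
  exact hbound t.sum ⟨u, t, hpre, ht, rfl⟩

-- M is below some candidate
lemma M_le_cand (a : Int) (q : List Int) :
    ∃ c ∈ (List.range (q.length + 1)).map (fun k => (pvRun a (q.take k)).1) ++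
      (List.range ((q.drop 1).length + 1)).map
        (fun k => (pvRun a (q.take k)).1 + pvGain (q.drop (k + 1))),
      (pvRun a q).2.2 ≤ c := by
  obtain ⟨-, -, hMa, -⟩ := run_inv a q
  rcases hMa with ⟨u, t, v, heq, ht, hMs⟩ | ⟨u, t, y, s, v, heq, hts, hMs⟩
  · obtain ⟨c, hmem, hle⟩ := plain_le_cand a q u t v heq ht
    exact ⟨c, List.mem_append.mpr (Or.inl hmem), by omega⟩
  · rcases eq_or_ne t ([] : List Int) with rfl | htne
    · -- deletion with nothing kept on the left: a plain window s
      have hs : s ≠ [] := by simpa using hts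
      have heq' : a :: q = (u ++ [y]) ++ s ++ v := by
        rw [heq]; simp [List.append_assoc]
      obtain ⟨c, hmem, hle⟩ := plain_le_cand a q (u ++ [y]) s v heq' hs
      exact ⟨c, List.mem_append.mpr (Or.inl hmem), by simp at hMs; omega⟩
    · rcases eq_or_ne s ([] : List Int) with rfl | hsne
      · -- deletion with nothing kept on the right: a plain window t
        have heq' : a :: q = u ++ t ++ (y :: v) := by
          rw [heq]; simp [List.append_assoc]
        obtain ⟨c, hmem, hle⟩ := plain_le_cand a q u t (y :: v) heq' htne
        exact ⟨c, List.mem_append.mpr (Or.inl hmem), by simp at hMs; omega⟩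
      · -- genuine deletion: both sides nonempty
        have hlt : 1 ≤ t.length := List.length_pos_of_ne_nil htne
        have hls : 1 ≤ s.length := List.length_pos_of_ne_nil hsne
        have hlen := congrArg List.length heq
        simp [List.length_append] at hlen
        set k := u.length + t.length - 1 with hkdef
        have hkd : k < (q.drop 1).length + 1 := by
          simp; omega
        have hpre : a :: q.take k = u ++ t :=
          take_prefix_eq a q u t (y :: (s ++ v))
            (by rw [heq]; simp [List.append_assoc]) htne
        obtain ⟨⟨-, hbound⟩, -, -, -⟩ := run_inv a (q.take k)
        have hts' : t.sum ≤ (pvRun a (q.take k)).1 := hbound t.sum ⟨u, t, hpre, htne, rfl⟩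
        have hdrop : q.drop (k + 1) = s ++ v := by
          have h1 : (a :: q).drop (k + 2) = q.drop (k + 1) := by
            simp [List.drop_succ_cons]
          have h2 : a :: q = ((u ++ t) ++ [y]) ++ (s ++ v) := by
            rw [heq]; simp [List.append_assoc]
          have h3 : ((u ++ t) ++ [y]).length = k + 2 := by
            simp [List.length_append]; omega
          rw [← h1, h2, ← h3, List.drop_left]
        have hss : s.sum ≤ pvGain (q.drop (k + 1)) := by
          rw [hdrop]; exact gain_ge_prefix s v
        refine ⟨(pvRun a (q.take k)).1 + pvGain (q.drop (k + 1)),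
          List.mem_append.mpr (Or.inr (List.mem_map.mpr ⟨k, List.mem_range.mpr hkd, rfl⟩)), ?_⟩
        omega

lemma b_eq_run (a : Int) (q : List Int) : solution_787_5_alt (a :: q) = (pvRun a q).2.2 := by
  rw [b_eval]
  set C := (List.range (q.length + 1)).map (fun k => (pvRun a (q.take k)).1) ++
      (List.range ((q.drop 1).length + 1)).map
        (fun k => (pvRun a (q.take k)).1 + pvGain (q.drop (k + 1))) with hC
  have hne : C ≠ [] := by
    simp [hC]
  obtain ⟨m, hm⟩ : ∃ m, PySem.List.max? C (fun y => y) = some m := by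
    cases hmax : PySem.List.max? C (fun y => y) with
    | none => exact absurd ((PySem.List.max?_eq_none_iff (xs := C) (key := fun y => y)).mp hmax) hne
    | some m => exact ⟨m, rfl⟩
  rw [hm, Option.getD_some]
  have hmem : m ∈ C := PySem.List.max?_mem hm
  have hub : ∀ y ∈ C, y ≤ m := PySem.List.max?_isMax hm
  have h1 : m ≤ (pvRun a q).2.2 := cand_le_M a q m hmem
  obtain ⟨c, hcC, hc⟩ := M_le_cand a q
  have h2 : (pvRun a q).2.2 ≤ m := le_trans hc (hub c hcC)
  omega

-- ===== VERDICT (by name: the statement is the Claim_ definition above) =====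
theorem solution_787_5_spec : Claim_equal_solution_787_5 := by
  intro arr _ hpre
  unfold Spec_solution_787_5
  obtain ⟨a, q, rfl⟩ : ∃ a q, arr = a :: q := by
    cases arr with
    | nil => exact absurd rfl hpre
    | cons a q => exact ⟨a, q, rfl⟩
  rw [a_eq_run, b_eq_run]
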